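-- pv_equiv track=rewrite | github.com/MPaolaP/Sisinfo-2025-ProyectoGrupal | app.py | _build_pdf_page_streams
-- ===== SOURCE A (Python) =====
-- PDF_PAGE_HEIGHT = 792
--
-- PDF_MARGIN = 72
--
-- def _pdf_escape(text):
--     if text is None:
--         return ''
--     return str(text).replace('\\', '\\\\').replace('(', '\\(').replace(')', '\\)')
--
-- def _build_pdf_page_streams(title, lines):
--     if lines is None:
--         lines = []
--     start_y = PDF_PAGE_HEIGHT - PDF_MARGIN
--     y = start_y
--     commands = []
--     pages = []
--
--     if title:
--         commands.extend([
--             'BT',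
--             '/F1 18 Tf',
--             f'72 {y:.2f} Td',
--             f'({_pdf_escape(title)}) Tj',
--             'ET'
--         ])
--         y -= 30
--
--     for line in lines:
--         if y < PDF_MARGIN:
--             pages.append('\n'.join(commands))
--             commands = []
--             y = start_y
--         commands.extend([
--             'BT',
--             '/F1 12 Tf',
--             f'72 {y:.2f} Td',
--             f'({_pdf_escape(line)}) Tj',
--             'ET'
--         ])
--         y -= 16
--
--     if not commands:
--         commands = ['BT', '/F1 12 Tf', f'72 {start_y:.2f} Td', '( ) Tj', 'ET']
--
--     pages.append('\n'.join(commands))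
--     return pages
-- ===== SOURCE B (Python) =====
-- PDF_PAGE_HEIGHT = 792
--
-- PDF_MARGIN = 72
--
-- def _pdf_escape(text):
--     if text is None:
--         return ''
--     return str(text).replace('\\', '\\\\').replace('(', '\\(').replace(')', '\\)')
--
-- def _text_cmds(text, y, font):
--     return ['BT', f'/F1 {font} Tf', f'72 {y:.2f} Td', f'({_pdf_escape(text)}) Tj', 'ET']
--
-- def _page_cmds(start_y, chunk):
--     out = []
--     y = start_y
--     for line in chunk:
--         out += _text_cmds(line, y, 12)
--         y -= 16
--     return out
--
-- def _build_pdf_page_streams(title, lines):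
--     # capacities computed arithmetically: a continuation page holds 41 lines,
--     # the first page holds 39 when a title is present, else 41
--     if lines is None:
--         lines = []
--     if title:
--         head, cap_first, first_start = _text_cmds(title, 720, 18), 39, 690
--     else:
--         head, cap_first, first_start = [], 41, 720
--     if not lines:
--         if head:
--             return ['\n'.join(head)]
--         return ['\n'.join(_text_cmds(' ', 720, 12))]
--     pages = ['\n'.join(head + _page_cmds(first_start, lines[:cap_first]))]
--     rest = lines[cap_first:]
--     for i in range(0, len(rest), 41):
--         pages.append('\n'.join(_page_cmds(720, rest[i:i+41])))
--     return pages
-- ===== Notes on version B (the rewrite author's own statement) =====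
-- stated objective: alternative
-- what changed: Replaces A's single scan that tracks the cursor y and flushes a page whenever y drops below the margin with an arithmetic pagination: page capacities are computed in closed form (39 lines on a titled first page, 41 otherwise), the line list is sliced/chunked accordingly, and each page's commands are emitted by a per-page pass.
import Mathlib
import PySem

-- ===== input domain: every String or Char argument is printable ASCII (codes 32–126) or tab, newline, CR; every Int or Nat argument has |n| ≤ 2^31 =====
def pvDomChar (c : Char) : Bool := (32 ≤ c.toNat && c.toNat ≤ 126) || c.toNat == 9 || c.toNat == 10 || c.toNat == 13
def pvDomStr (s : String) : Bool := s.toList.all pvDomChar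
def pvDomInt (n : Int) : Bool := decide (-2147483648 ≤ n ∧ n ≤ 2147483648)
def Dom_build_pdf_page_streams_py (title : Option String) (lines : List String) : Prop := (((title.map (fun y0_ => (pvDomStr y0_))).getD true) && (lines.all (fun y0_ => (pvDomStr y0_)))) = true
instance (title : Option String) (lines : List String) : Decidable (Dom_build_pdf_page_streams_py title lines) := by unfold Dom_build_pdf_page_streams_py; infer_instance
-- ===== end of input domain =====

-- B replaces A's y-cursor scan with closed-form page capacities and chunking; same output, same O(n) cost.

-- ===== PORT A =====
-- _pdf_escape on a string argument (the None branch is unreachable for the string inputs both ports receive)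
def pdfEsc (s : String) : String :=
  PySem.Str.replace (PySem.Str.replace (PySem.Str.replace s "\\" "\\\\") "(" "\\(") ")" "\\)"

-- f'{y:.2f}' where y is always a Python int: exact as str(y) + ".00"
def fmtY (y : Int) : String := PySem.Int.toStr y ++ ".00"

def lineCmds (y : Int) (l : String) : List String :=
  ["BT", "/F1 12 Tf", "72 " ++ fmtY y ++ " Td", "(" ++ pdfEsc l ++ ") Tj", "ET"]

def titleCmds (t : String) (y : Int) : List String :=
  ["BT", "/F1 18 Tf", "72 " ++ fmtY y ++ " Td", "(" ++ pdfEsc t ++ ") Tj", "ET"]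

-- the 'for line in lines' loop: state = (y, commands, pages)
def aLoop : List String → Int → List String → List String → List String × List String
  | [], _, cmds, pages => (cmds, pages)
  | l :: ls, y, cmds, pages =>
    if y < 72 then
      aLoop (l :: ls) 720 [] (pages ++ [PySem.Str.join "\n" cmds])
    else
      aLoop ls (y - 16) (cmds ++ lineCmds y l) pages
termination_by ls y _ _ => 2 * ls.length + (if y < 72 then 1 else 0)
decreasing_by all_goals (simp only [List.length_cons]; split_ifs <;> omega)

def build_pdf_page_streams_py (title : Option String) (lines : List String) : List String :=
  let startY : Int := 792 - 72
  let init : List String × Int :=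
    match title with
    | some t => if t ≠ "" then (titleCmds t startY, startY - 30) else ([], startY)
    | none => ([], startY)
  let r := aLoop lines init.2 init.1 []
  let cmds := if r.1 = [] then ["BT", "/F1 12 Tf", "72 " ++ fmtY startY ++ " Td", "( ) Tj", "ET"] else r.1
  r.2 ++ [PySem.Str.join "\n" cmds]

-- ===== PORT B =====
def textCmds (t : String) (y : Int) (font : Int) : List String :=
  ["BT", "/F1 " ++ PySem.Int.toStr font ++ " Tf", "72 " ++ fmtY y ++ " Td",
   "(" ++ pdfEsc t ++ ") Tj", "ET"]

-- _page_cmds: emit one page's commands, y stepping down by 16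
def pageCmdsB : Int → List String → List String
  | _, [] => []
  | y, l :: ls => textCmds l y 12 ++ pageCmdsB (y - 16) ls

-- the 'for i in range(0, len(rest), 41)' chunking loop
def chunkPages : List String → List String
  | [] => []
  | l :: ls =>
    PySem.Str.join "\n" (pageCmdsB 720 ((l :: ls).take 41)) :: chunkPages ((l :: ls).drop 41)
termination_by ls => ls.length
decreasing_by simp

def build_pdf_page_streams_py_alt (title : Option String) (lines : List String) : List String :=
  let hcf : List String × Nat × Int :=
    match title with
    | some t => if t ≠ "" then (textCmds t 720 18, 39, 690) else ([], 41, 720)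
    | none => ([], 41, 720)
  match lines with
  | [] =>
    if hcf.1 ≠ [] then [PySem.Str.join "\n" hcf.1]
    else [PySem.Str.join "\n" (textCmds " " 720 12)]
  | _ :: _ =>
    PySem.Str.join "\n" (hcf.1 ++ pageCmdsB hcf.2.2 (lines.take hcf.2.1))
      :: chunkPages (lines.drop hcf.2.1)

-- ===== PRECONDITION & SPEC =====
def Spec_build_pdf_page_streams_py (title : Option String) (lines : List String) (out : List String) : Prop := out = build_pdf_page_streams_py_alt title lines
instance (title : Option String) (lines : List String) (out : List String) : Decidable (Spec_build_pdf_page_streams_py title lines out) := by unfold Spec_build_pdf_page_streams_py; infer_instance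

-- ===== CLAIM (what is proved, stated in full; the proofs are below) =====
def Claim_equal_build_pdf_page_streams_py : Prop := ∀ (title : Option String) (lines : List String), Dom_build_pdf_page_streams_py title lines → Spec_build_pdf_page_streams_py title lines (build_pdf_page_streams_py title lines)

-- ===== LEMMAS AND PROOFS =====

-- '/F1 12 Tf' rendered through the font parameter equals A's literal
lemma textCmds_eq_lineCmds (l : String) (y : Int) : textCmds l y 12 = lineCmds y l := by
  simp only [textCmds, lineCmds, List.cons.injEq]
  decide

-- titled header: A's literal '/F1 18 Tf' form
lemma textCmds_eq_titleCmds (t : String) : textCmds t 720 18 = titleCmds t 720 := by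
  simp only [textCmds, titleCmds, List.cons.injEq]
  decide

-- the placeholder page
lemma placeholder_eq : textCmds " " 720 12 = ["BT", "/F1 12 Tf", "72 " ++ fmtY 720 ++ " Td", "( ) Tj", "ET"] := by
  simp only [textCmds, List.cons.injEq]
  decide

-- capacity of a page whose first free row is y
def capF (y : Int) : Nat := ((y - 72) / 16).toNat + 1

lemma capF_low {y : Int} (h1 : 72 ≤ y) (h2 : y < 88) : capF y = 1 := by unfold capF; omega

lemma capF_step {y : Int} (h : 88 ≤ y) : capF y = capF (y - 16) + 1 := by unfold capF; omega

lemma pageCmdsB_cons (y : Int) (l : String) (ls : List String) :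
    pageCmdsB y (l :: ls) = lineCmds y l ++ pageCmdsB (y - 16) ls := by
  rw [pageCmdsB, textCmds_eq_lineCmds]

-- the filling of one page, characterised arithmetically
lemma aLoop_page (ls : List String) : ∀ (y : Int) (cmds0 pages : List String), 72 ≤ y →
    aLoop ls y cmds0 pages =
      if ls.length ≤ capF y then (cmds0 ++ pageCmdsB y ls, pages)
      else aLoop (ls.drop (capF y)) 720 []
        (pages ++ [PySem.Str.join "\n" (cmds0 ++ pageCmdsB y (ls.take (capF y)))]) := by
  induction ls with
  | nil =>
    intro y c p hy
    rw [aLoop, if_pos (by simp [capF])]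
    simp [pageCmdsB]
  | cons l ls ih =>
    intro y c p hy
    rw [aLoop, if_neg (by omega)]
    by_cases h88 : 88 ≤ y
    · rw [ih (y - 16) _ p (by omega), capF_step h88]
      by_cases hl : ls.length ≤ capF (y - 16)
      · rw [if_pos hl, if_pos (by simp; omega)]
        simp [pageCmdsB_cons, List.append_assoc]
      · rw [if_neg hl, if_neg (by simp; omega)]
        simp [pageCmdsB_cons, List.append_assoc]
    · rw [capF_low hy (by omega)]
      cases ls with
      | nil =>
        rw [aLoop, if_pos (by simp)]
        simp [pageCmdsB, textCmds_eq_lineCmds]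
      | cons l2 ls2 =>
        rw [aLoop, if_pos (by omega), if_neg (by simp)]
        simp [pageCmdsB, textCmds_eq_lineCmds]

lemma capF_720 : capF 720 = 41 := by decide

lemma capF_690 : capF 690 = 39 := by decide

lemma aLoop_pages (ls : List String) : ∀ (pages : List String), ls ≠ [] →
    (aLoop ls 720 [] pages).2 ++ [PySem.Str.join "\n" (aLoop ls 720 [] pages).1]
      = pages ++ chunkPages ls := by
  induction hn : ls.length using Nat.strong_induction_on generalizing ls with
  | _ n ih =>
    intro pages hne
    obtain ⟨l, t, rfl⟩ := List.exists_cons_of_ne_nil hne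
    rw [aLoop_page _ 720 [] pages (by omega), capF_720]
    by_cases hle : (l :: t).length ≤ 41
    · rw [if_pos hle, chunkPages]
      simp [List.take_of_length_le hle, List.drop_eq_nil_of_le hle, chunkPages]
    · rw [if_neg hle]
      have hd : (l :: t).drop 41 ≠ [] := by
        simp only [ne_eq, List.drop_eq_nil_iff]; omega
      rw [ih ((l :: t).drop 41).length (by subst hn; simp) _ rfl _ hd, chunkPages]
      simp

lemma aLoop_fst_ne_nil (ls : List String) : ∀ (pages : List String), ls ≠ [] →
    (aLoop ls 720 [] pages).1 ≠ [] := by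
  induction hn : ls.length using Nat.strong_induction_on generalizing ls with
  | _ n ih =>
    intro pages hne
    obtain ⟨l, t, rfl⟩ := List.exists_cons_of_ne_nil hne
    rw [aLoop_page _ 720 [] pages (by omega), capF_720]
    by_cases hle : (l :: t).length ≤ 41
    · rw [if_pos hle]
      simp [pageCmdsB, textCmds]
    · rw [if_neg hle]
      have hd : (l :: t).drop 41 ≠ [] := by
        simp only [ne_eq, List.drop_eq_nil_iff]; omega
      exact ih ((l :: t).drop 41).length (by subst hn; simp) _ rfl _ hd

-- one non-empty page run: A's scan from first free row y0 equals B's slice-and-chunk form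
lemma core (head : List String) (y0 : Int) (l : String) (ls : List String) (hy : 72 ≤ y0) :
    (aLoop (l :: ls) y0 head []).2 ++
      [PySem.Str.join "\n" (aLoop (l :: ls) y0 head []).1]
      = PySem.Str.join "\n" (head ++ pageCmdsB y0 ((l :: ls).take (capF y0)))
          :: chunkPages ((l :: ls).drop (capF y0)) := by
  rw [aLoop_page _ y0 head [] hy]
  by_cases h : (l :: ls).length ≤ capF y0
  · rw [if_pos h]
    simp [List.take_of_length_le h, List.drop_eq_nil_of_le h, chunkPages]
  · rw [if_neg h]
    have hd : (l :: ls).drop (capF y0) ≠ [] := by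
      simp only [ne_eq, List.drop_eq_nil_iff]; omega
    simpa using aLoop_pages ((l :: ls).drop (capF y0))
      [PySem.Str.join "\n" (head ++ pageCmdsB y0 ((l :: ls).take (capF y0)))] hd

lemma core_ne (head : List String) (y0 : Int) (l : String) (ls : List String) (hy : 72 ≤ y0) :
    (aLoop (l :: ls) y0 head []).1 ≠ [] := by
  rw [aLoop_page _ y0 head [] hy]
  by_cases h : (l :: ls).length ≤ capF y0
  · rw [if_pos h]
    simp [pageCmdsB, textCmds]
  · rw [if_neg h]
    exact aLoop_fst_ne_nil _ _ (by simp only [ne_eq, List.drop_eq_nil_iff]; omega)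

lemma h720 : (792 : Int) - 72 = 720 := by norm_num

lemma h690 : (720 : Int) - 30 = 690 := by norm_num

-- ===== VERDICT (by name: the statement is the Claim_ definition above) =====
theorem build_pdf_page_streams_py_spec : Claim_equal_build_pdf_page_streams_py := by
  intro title lines _
  unfold Spec_build_pdf_page_streams_py
  rcases title with _ | t
  · rcases lines with _ | ⟨l, ls⟩
    · simp [build_pdf_page_streams_py, build_pdf_page_streams_py_alt, aLoop, placeholder_eq, h720]
    · have hne := core_ne [] 720 l ls (by omega)
      have hco := core [] 720 l ls (by omega)
      rw [capF_720] at hco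
      simp only [build_pdf_page_streams_py, build_pdf_page_streams_py_alt, h720]
      rw [if_neg hne]
      simpa using hco
  · by_cases ht : t = ""
    · subst ht
      rcases lines with _ | ⟨l, ls⟩
      · simp [build_pdf_page_streams_py, build_pdf_page_streams_py_alt, aLoop, placeholder_eq, h720]
      · have hne := core_ne [] 720 l ls (by omega)
        have hco := core [] 720 l ls (by omega)
        rw [capF_720] at hco
        simp only [build_pdf_page_streams_py, build_pdf_page_streams_py_alt, h720, ne_eq,
          not_true, if_false]
        rw [if_neg hne]
        simpa using hco
    · rcases lines with _ | ⟨l, ls⟩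
      · simp [build_pdf_page_streams_py, build_pdf_page_streams_py_alt, h720, ht, aLoop,
          textCmds_eq_titleCmds, titleCmds]
      · have hne := core_ne (titleCmds t 720) 690 l ls (by omega)
        have hco := core (titleCmds t 720) 690 l ls (by omega)
        rw [capF_690] at hco
        simp only [build_pdf_page_streams_py, build_pdf_page_streams_py_alt, h720, ne_eq, ht,
          not_false_eq_true, if_true, textCmds_eq_titleCmds, h690]
        rw [if_neg hne]
        simpa using hco
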